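-- pv_equiv track=rewrite | github.com/Rvelamen/Octopus | backend/agent/context.py | _prepend_time_to_multimodal
-- ===== SOURCE A (Python) =====
-- from typing import Any
--
-- def _prepend_time_to_multimodal(
--
--     content: list[dict[str, Any]],
--     time_prefix: str
-- ) -> list[dict[str, Any]]:
--     """Prepend time prefix to the first text item in multi-modal content."""
--     result = []
--     time_added = False
--     for item in content:
--         if item["type"] == "text" and not time_added:
--             result.append({"type": "text", "text": time_prefix + item["text"]})
--             time_added = True
--         else:
--             result.append(item)
--     if not time_added:
--         # No text item found, add time as first item
--         result.insert(0, {"type": "text", "text": time_prefix.strip()})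
--     return result
-- ===== SOURCE B (Python) =====
-- def _prepend_time_to_multimodal(content, time_prefix):
--     """Prepend time prefix to the first text item in multi-modal content."""
--     def go(items):
--         # Recursively rebuild the list; None means no text item in `items`.
--         if not items:
--             return None
--         head = items[0]
--         if head["type"] == "text":
--             return [{"type": "text", "text": time_prefix + head["text"]}] + items[1:]
--         rest = go(items[1:])
--         return None if rest is None else [head] + rest
--
--     out = go(content)
--     if out is None:
--         return [{"type": "text", "text": time_prefix.strip()}] + list(content)
--     return out
-- ===== Notes on version B (the rewrite author's own statement) =====
-- stated objective: alternative
-- what changed: Replaces the flag-tracking single-pass accumulator loop with a structural recursion that returns the rebuilt tail or None when no text item exists, prepending the stripped prefix item in that case.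
import Mathlib
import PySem

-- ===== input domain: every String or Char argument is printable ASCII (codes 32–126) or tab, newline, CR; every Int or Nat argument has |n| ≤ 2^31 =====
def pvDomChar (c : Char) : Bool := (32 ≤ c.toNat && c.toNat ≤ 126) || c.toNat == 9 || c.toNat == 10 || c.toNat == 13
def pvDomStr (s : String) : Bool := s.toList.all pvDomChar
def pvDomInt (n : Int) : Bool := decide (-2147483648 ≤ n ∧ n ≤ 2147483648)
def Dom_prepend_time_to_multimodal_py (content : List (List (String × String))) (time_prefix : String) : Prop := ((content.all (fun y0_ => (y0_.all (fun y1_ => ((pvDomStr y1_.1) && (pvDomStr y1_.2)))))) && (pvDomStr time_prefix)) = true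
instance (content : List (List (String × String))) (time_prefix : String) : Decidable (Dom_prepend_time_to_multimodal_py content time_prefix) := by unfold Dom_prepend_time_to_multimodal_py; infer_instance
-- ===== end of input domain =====

-- B replaces A's flag-tracking accumulator loop with a structural recursion returning Option (the rebuilt tail, or none when no text item exists); alternative decomposition, same cost. Return-value equivalence only (neither program mutates its arguments).


-- ===== PORT A =====
def prepend_time_to_multimodal_py (content : List (List (String × String))) (time_prefix : String) : List (List (String × String)) :=
  let r := content.foldl (fun (st : List (List (String × String)) × Bool) item =>
    if (((item.lookup "type").getD "") == "text") && !st.2 then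
      (st.1 ++ [[("type", "text"), ("text", time_prefix ++ ((item.lookup "text").getD ""))]], true)
    else
      (st.1 ++ [item], st.2)) ([], false)
  if !r.2 then PySem.List.insert r.1 0 [("type", "text"), ("text", PySem.Str.strip time_prefix)] else r.1

-- ===== PORT B =====
-- recursive helper `go`: some (rebuilt list) once the first text item is found, none otherwise
def pvGo (time_prefix : String) : List (List (String × String)) → Option (List (List (String × String)))
  | [] => none
  | head :: tail =>
    if ((head.lookup "type").getD "") == "text" then
      some ([("type", "text"), ("text", time_prefix ++ ((head.lookup "text").getD ""))] :: tail)
    else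
      match pvGo time_prefix tail with
      | none => none
      | some rest => some (head :: rest)

def prepend_time_to_multimodal_py_alt (content : List (List (String × String))) (time_prefix : String) : List (List (String × String)) :=
  match pvGo time_prefix content with
  | none => [("type", "text"), ("text", PySem.Str.strip time_prefix)] :: content
  | some out => out

-- ===== PRECONDITION & SPEC =====
-- Pre_ excludes inputs where Python A raises KeyError: an item missing the "type" key,
-- or the first text item missing the "text" key.
def Pre_prepend_time_to_multimodal_py (content : List (List (String × String))) (time_prefix : String) : Prop :=
  ((content.all (fun item => (item.lookup "type").isSome))
    && (content.find? (fun item => ((item.lookup "type").getD "") == "text")).all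
         (fun item => (item.lookup "text").isSome)) = true
instance (content : List (List (String × String))) (time_prefix : String) : Decidable (Pre_prepend_time_to_multimodal_py content time_prefix) := by unfold Pre_prepend_time_to_multimodal_py; infer_instance
def pvWitness_prepend_time_to_multimodal_py : (List (List (String × String))) × String :=
  ([[("type", "image"), ("url", "u")], [("type", "text"), ("text", "hi")]], "[12:00] ")

def Spec_prepend_time_to_multimodal_py (content : List (List (String × String))) (time_prefix : String) (out : List (List (String × String))) : Prop := out = prepend_time_to_multimodal_py_alt content time_prefix
instance (content : List (List (String × String))) (time_prefix : String) (out : List (List (String × String))) : Decidable (Spec_prepend_time_to_multimodal_py content time_prefix out) := by unfold Spec_prepend_time_to_multimodal_py; infer_instance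

-- ===== CLAIM (what is proved, stated in full; the proofs are below) =====
def Claim_equal_prepend_time_to_multimodal_py : Prop := ∀ (content : List (List (String × String))) (time_prefix : String), Dom_prepend_time_to_multimodal_py content time_prefix → Pre_prepend_time_to_multimodal_py content time_prefix → Spec_prepend_time_to_multimodal_py content time_prefix (prepend_time_to_multimodal_py content time_prefix)

-- ===== LEMMAS AND PROOFS =====

-- A's loop after the flag is set copies every remaining item unchanged.
theorem pv_loop_true (tp : String) (content : List (List (String × String)))
    (acc : List (List (String × String))) :
    content.foldl (fun (st : List (List (String × String)) × Bool) item =>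
      if (((item.lookup "type").getD "") == "text") && !st.2 then
        (st.1 ++ [[("type", "text"), ("text", tp ++ ((item.lookup "text").getD ""))]], true)
      else
        (st.1 ++ [item], st.2)) (acc, true) = (acc ++ content, true) := by
  induction content generalizing acc with
  | nil => simp [List.foldl]
  | cons x xs ih =>
    rw [List.foldl_cons]
    simp only [Bool.not_true, Bool.and_false]
    rw [if_neg (by simp), ih]
    simp

-- A's loop before the flag is set, characterised by B's recursion pvGo.
theorem pv_loop_false (tp : String) (content : List (List (String × String)))
    (acc : List (List (String × String))) :
    content.foldl (fun (st : List (List (String × String)) × Bool) item =>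
      if (((item.lookup "type").getD "") == "text") && !st.2 then
        (st.1 ++ [[("type", "text"), ("text", tp ++ ((item.lookup "text").getD ""))]], true)
      else
        (st.1 ++ [item], st.2)) (acc, false) =
    (match pvGo tp content with
     | some out => (acc ++ out, true)
     | none => (acc ++ content, false)) := by
  induction content generalizing acc with
  | nil => simp [List.foldl, pvGo]
  | cons x xs ih =>
    by_cases hx : (((x.lookup "type").getD "") == "text") = true
    · rw [List.foldl_cons, if_pos (by simp [hx]), pv_loop_true]
      simp [pvGo, hx]
    · have hx' : (((x.lookup "type").getD "") == "text") = false := by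
        simpa using hx
      rw [List.foldl_cons, if_neg (by simp [hx']), ih (acc ++ [x])]
      simp only [pvGo, hx', Bool.false_eq_true, if_false]
      cases h : pvGo tp xs with
      | none => simp
      | some rest => simp

-- ===== VERDICT (by name: the statement is the Claim_ definition above) =====
theorem prepend_time_to_multimodal_py_spec : Claim_equal_prepend_time_to_multimodal_py := by
  intro content time_prefix _ _
  unfold Spec_prepend_time_to_multimodal_py prepend_time_to_multimodal_py prepend_time_to_multimodal_py_alt
  rw [pv_loop_false]
  cases h : pvGo time_prefix content with
  | none => simp only []; rw [if_pos (by simp), PySem.List.insert_zero]; simp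
  | some out => simp
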